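-- pv_equiv track=rewrite | github.com/ZizouHuweidi/advent-of-code | 2016/day2/main.py | Part1
-- ===== SOURCE A (Python) =====
-- def Part1(s):
--     res = ""
--     key = 5
--
--     for line in s:
--         for c in line:
--             if c == "U" and key < 4:
--                 continue
--             if c == "D" and key > 6:
--                 continue
--             if c == "R" and key in [3, 6, 9]:
--                 continue
--             if c == "L" and key in [1, 4, 7]:
--                 continue
--
--             if c == "U":
--                 key -= 3
--             elif c == "D":
--                 key += 3
--             elif c == "R":
--                 key += 1
--             elif c == "L":
--                 key -= 1
--
--         res += str(key)
--
--     return res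
-- ===== SOURCE B (Python) =====
-- def Part1(s):
--     res = []
--     row, col = 1, 1  # key 5
--     for line in s:
--         for c in line:
--             if c == "U":
--                 row = max(row - 1, 0)
--             elif c == "D":
--                 row = min(row + 1, 2)
--             elif c == "L":
--                 col = max(col - 1, 0)
--             elif c == "R":
--                 col = min(col + 1, 2)
--         res.append(str(3 * row + col + 1))
--     return "".join(res)
-- ===== Notes on version B (the rewrite author's own statement) =====
-- stated objective: idiomatic
-- what changed: Tracks the position as (row, col) grid coordinates clamped to [0,2] with max/min instead of a flat key with explicit edge-membership guard chains, and joins per-line digits instead of repeated string concatenation.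
import Mathlib
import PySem

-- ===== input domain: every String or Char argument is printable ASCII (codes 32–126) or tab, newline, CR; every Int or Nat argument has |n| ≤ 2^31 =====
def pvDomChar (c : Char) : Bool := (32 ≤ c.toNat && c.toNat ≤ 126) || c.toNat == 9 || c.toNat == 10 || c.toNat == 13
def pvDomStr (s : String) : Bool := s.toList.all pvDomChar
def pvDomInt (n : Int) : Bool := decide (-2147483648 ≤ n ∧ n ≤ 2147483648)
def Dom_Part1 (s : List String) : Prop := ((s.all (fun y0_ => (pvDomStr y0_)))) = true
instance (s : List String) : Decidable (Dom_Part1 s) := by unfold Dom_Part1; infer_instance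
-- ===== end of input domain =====

-- B tracks the position as clamped (row, col) grid coordinates instead of a flat key with edge-guard chains (idiomatic).

-- ===== PORT A =====
-- one character step of A's inner loop: the guard chain, then the move chain
def pvStepA (key : Int) (c : Char) : Int :=
  if c = 'U' ∧ key < 4 then key
  else if c = 'D' ∧ key > 6 then key
  else if c = 'R' ∧ (key = 3 ∨ key = 6 ∨ key = 9) then key
  else if c = 'L' ∧ (key = 1 ∨ key = 4 ∨ key = 7) then key
  else if c = 'U' then key - 3
  else if c = 'D' then key + 3
  else if c = 'R' then key + 1
  else if c = 'L' then key - 1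
  else key

def Part1 (s : List String) : String :=
  (s.foldl (fun (st : String × Int) line =>
    let key := line.toList.foldl pvStepA st.2
    (st.1 ++ PySem.Int.toStr key, key)) ("", 5)).1

-- ===== PORT B =====
-- one character step of B's inner loop on (row, col)
def pvStepB (rc : Int × Int) (c : Char) : Int × Int :=
  if c = 'U' then (max (rc.1 - 1) 0, rc.2)
  else if c = 'D' then (min (rc.1 + 1) 2, rc.2)
  else if c = 'L' then (rc.1, max (rc.2 - 1) 0)
  else if c = 'R' then (rc.1, min (rc.2 + 1) 2)
  else rc

def Part1_alt (s : List String) : String :=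
  let st := s.foldl (fun (st : List String × (Int × Int)) line =>
    let rc := line.toList.foldl pvStepB st.2
    (st.1 ++ [PySem.Int.toStr (3 * rc.1 + rc.2 + 1)], rc)) ([], (1, 1))
  PySem.Str.join "" st.1

-- ===== PRECONDITION & SPEC =====
def Spec_Part1 (s : List String) (out : String) : Prop := out = Part1_alt s
instance (s : List String) (out : String) : Decidable (Spec_Part1 s out) := by unfold Spec_Part1; infer_instance

-- ===== CLAIM (what is proved, stated in full; the proofs are below) =====
def Claim_equal_Part1 : Prop := ∀ (s : List String), Dom_Part1 s → Spec_Part1 s (Part1 s)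

-- ===== LEMMAS AND PROOFS =====

-- the coordinate correspondence: key = 3*row + col + 1 with row, col ∈ [0,2]
def pvInv (key : Int) (rc : Int × Int) : Prop :=
  0 ≤ rc.1 ∧ rc.1 ≤ 2 ∧ 0 ≤ rc.2 ∧ rc.2 ≤ 2 ∧ key = 3 * rc.1 + rc.2 + 1

theorem pvStep_inv (key : Int) (rc : Int × Int) (c : Char) (h : pvInv key rc) :
    pvInv (pvStepA key c) (pvStepB rc c) := by
  obtain ⟨r, co⟩ := rc
  obtain ⟨h1, h2, h3, h4, h5⟩ := h
  unfold pvStepA pvStepB pvInv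
  by_cases hU : c = 'U' <;> by_cases hD : c = 'D' <;> by_cases hR : c = 'R' <;>
    by_cases hL : c = 'L' <;> simp_all <;> split_ifs <;> simp_all <;> omega

theorem pvFold_inv (cs : List Char) (key : Int) (rc : Int × Int) (h : pvInv key rc) :
    pvInv (cs.foldl pvStepA key) (cs.foldl pvStepB rc) := by
  induction cs generalizing key rc with
  | nil => exact h
  | cons c cs ih => exact ih _ _ (pvStep_inv key rc c h)

theorem pvInterc_nil (xs : List (List Char)) : [].intercalate xs = xs.flatten := by
  induction xs with
  | nil => simp [List.intercalate]
  | cons a l ih =>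
    cases l with
    | nil => simp [List.intercalate]
    | cons b l =>
      have h := PySem.Chars.join_cons_cons (sep := []) (p := a) (q := b) (rest := l)
      simp [PySem.Chars.join] at h
      simp_all

theorem pvJoin_append (l : List String) (x : String) :
    PySem.Str.join "" (l ++ [x]) = PySem.Str.join "" l ++ x := by
  simp [PySem.Str.join, PySem.Chars.join, pvInterc_nil]

theorem pvMain (s : List String) (key : Int) (rc : Int × Int) (acc : List String)
    (h : pvInv key rc) :
    (s.foldl (fun (st : String × Int) line =>
      let k := line.toList.foldl pvStepA st.2
      (st.1 ++ PySem.Int.toStr k, k)) (PySem.Str.join "" acc, key)).1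
    = PySem.Str.join ""
      (s.foldl (fun (st : List String × (Int × Int)) line =>
        let rc' := line.toList.foldl pvStepB st.2
        (st.1 ++ [PySem.Int.toStr (3 * rc'.1 + rc'.2 + 1)], rc')) (acc, rc)).1 := by
  induction s generalizing key rc acc with
  | nil => simp
  | cons line s ih =>
    simp only [List.foldl_cons]
    have hinv := pvFold_inv line.toList key rc h
    have hk : line.toList.foldl pvStepA key
        = 3 * (line.toList.foldl pvStepB rc).1 + (line.toList.foldl pvStepB rc).2 + 1 :=
      hinv.2.2.2.2
    rw [hk, ← pvJoin_append acc]
    rw [hk] at hinv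
    exact ih _ _ _ hinv

-- ===== VERDICT (by name: the statement is the Claim_ definition above) =====
theorem Part1_spec : Claim_equal_Part1 := by
  intro s _
  unfold Spec_Part1 Part1 Part1_alt
  have h : pvInv 5 ((1 : Int), (1 : Int)) := by unfold pvInv; norm_num
  have := pvMain s 5 (1, 1) [] h
  simpa [PySem.Str.join] using this
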